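-- pv_equiv track=rewrite | github.com/andremedeiro/ufcg | prog1/exercicios/10Unidade/NumeroDisciplinas/questao.py | numero_disciplinas
-- ===== SOURCE A (Python) =====
-- def meu_in(elemento, lista):
--     for coisa in lista:
--         if coisa == elemento:
--             return True
--     return False
--
-- def aprovado(cursadas, requisitos):
--     for disciplina in requisitos:
--         if not meu_in(disciplina, cursadas):
--             return False
--     return True
--
-- def numero_disciplinas(grade, horarios, cursadas):
--     cadeiras = {}
--
--     for disciplina in horarios.items():
--         if not meu_in(disciplina[0], cursadas):
--             if aprovado(cursadas, grade[disciplina[0]]):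
--                 if not meu_in(disciplina[1], cadeiras.values()):
--                     cadeiras[disciplina[0]] = disciplina[1]
--
--     return len(cadeiras)
-- ===== SOURCE B (Python) =====
-- def numero_disciplinas(grade, horarios, cursadas):
--     taken = set(cursadas)
--     slots = sorted(h for d, h in horarios.items()
--                    if d not in taken and taken.issuperset(grade[d]))
--     count = 0
--     prev = None
--     for h in slots:
--         if prev is None or h != prev:
--             count += 1
--         prev = h
--     return count
-- ===== Notes on version B (the rewrite author's own statement) =====
-- stated objective: alternative
-- what changed: Replaces A's incremental discipline-keyed dict with its not-in-values() dedup branch by a filter-sort-scan pipeline: collect the time slots of eligible disciplines, sort them, and count boundaries between adjacent distinct slots.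
import Mathlib
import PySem

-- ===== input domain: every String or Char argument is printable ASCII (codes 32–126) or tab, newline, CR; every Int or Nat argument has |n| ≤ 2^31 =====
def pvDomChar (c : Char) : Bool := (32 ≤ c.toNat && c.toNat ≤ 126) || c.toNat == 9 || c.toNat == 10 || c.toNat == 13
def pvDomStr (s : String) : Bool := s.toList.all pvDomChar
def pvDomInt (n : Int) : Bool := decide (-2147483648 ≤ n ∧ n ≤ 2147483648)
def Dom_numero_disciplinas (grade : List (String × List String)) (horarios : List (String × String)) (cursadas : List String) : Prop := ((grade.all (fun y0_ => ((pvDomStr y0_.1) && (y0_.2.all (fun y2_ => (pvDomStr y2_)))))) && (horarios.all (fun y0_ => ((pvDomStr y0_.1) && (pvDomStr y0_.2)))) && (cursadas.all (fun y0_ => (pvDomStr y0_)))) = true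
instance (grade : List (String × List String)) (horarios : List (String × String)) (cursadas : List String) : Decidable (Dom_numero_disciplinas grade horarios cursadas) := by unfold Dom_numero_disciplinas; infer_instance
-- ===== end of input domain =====

-- B replaces A's incremental dict with not-in-values() dedup by a filter-sort-scan pipeline
-- (collect eligible slots, sort, count adjacent-distinct boundaries); objective: alternative.

-- ===== PORT A =====
-- meu_in: linear scan with early return
def pvMeuIn (e : String) : List String → Bool
  | [] => false
  | c :: rest => if c == e then true else pvMeuIn e rest

-- aprovado: every requisito is in cursadas (early return on failure)
def pvAprovado (cursadas : List String) : List String → Bool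
  | [] => true
  | d :: rest => if !pvMeuIn d cursadas then false else pvAprovado cursadas rest

-- one iteration of A's loop; 'none' threads a KeyError from grade[disciplina[0]]
def pvStepA (grade : List (String × List String)) (cursadas : List String)
    (st : Option (PySem.Dict String String)) (d : String × String) :
    Option (PySem.Dict String String) :=
  match st with
  | none => none
  | some cad =>
    if !pvMeuIn d.1 cursadas then
      match (PySem.Dict.mk grade).get? d.1 with
      | none => none          -- KeyError in Python
      | some reqs =>
        if pvAprovado cursadas reqs then
          if !pvMeuIn d.2 cad.values then some (cad.insert d.1 d.2) else some cad
        else some cad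
    else some cad

def numero_disciplinas (grade : List (String × List String)) (horarios : List (String × String)) (cursadas : List String) : Int :=
  match horarios.foldl (pvStepA grade cursadas) (some (PySem.Dict.mk [])) with
  | some cadeiras => (cadeiras.size : Int)
  | none => 0     -- unreachable under Pre_ (Python raises KeyError)

-- ===== PORT B =====
-- the generator feeding sorted(): slots of eligible disciplines, in horarios order;
-- 'none' threads a KeyError from grade[d]
def pvEligibleSlots (grade : List (String × List String)) (taken : PySem.Set String) :
    List (String × String) → Option (List String)
  | [] => some []
  | (d, h) :: rest =>
    if PySem.Set.contains taken d then pvEligibleSlots grade taken rest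
    else
      match (PySem.Dict.mk grade).get? d with
      | none => none          -- KeyError in Python
      | some reqs =>
        match pvEligibleSlots grade taken rest with
        | none => none
        | some tl => some (if PySem.Set.issuperset taken reqs then h :: tl else tl)

-- the for-loop over the sorted slots: count, prev
def pvScan : List String → Option String → Int → Int
  | [], _, c => c
  | h :: t, none, c => pvScan t (some h) (c + 1)           -- prev is None: first slot counts
  | h :: t, some p, c => pvScan t (some h) (if p != h then c + 1 else c)

def numero_disciplinas_alt (grade : List (String × List String)) (horarios : List (String × String)) (cursadas : List String) : Int :=
  match pvEligibleSlots grade (PySem.Set.ofList cursadas) horarios with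
  | none => 0     -- unreachable under Pre_ (Python raises KeyError)
  | some slots => pvScan (PySem.List.sorted slots (fun x => x) false) none 0

-- ===== PRECONDITION & SPEC =====
-- Pre_ excludes (a) inputs where Python raises KeyError: a horarios discipline outside cursadas and
-- missing from grade; and (b) duplicate keys in the horarios association list, which cannot arise
-- from a Python dict (dict keys are unique) and so represent no Python input.
def Pre_numero_disciplinas (grade : List (String × List String)) (horarios : List (String × String)) (cursadas : List String) : Prop :=
  (horarios.map Prod.fst).Nodup ∧
  ∀ p ∈ horarios, p.1 ∉ cursadas → p.1 ∈ grade.map Prod.fst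
instance (grade : List (String × List String)) (horarios : List (String × String)) (cursadas : List String) : Decidable (Pre_numero_disciplinas grade horarios cursadas) := by unfold Pre_numero_disciplinas; infer_instance

def pvWitness_numero_disciplinas : (List (String × List String)) × (List (String × String)) × List String :=
  ([("p1", []), ("p2", ["p1"])], [("p1", "seg 8"), ("p2", "seg 8")], ["p1"])

def Spec_numero_disciplinas (grade : List (String × List String)) (horarios : List (String × String)) (cursadas : List String) (out : Int) : Prop := out = numero_disciplinas_alt grade horarios cursadas
instance (grade : List (String × List String)) (horarios : List (String × String)) (cursadas : List String) (out : Int) : Decidable (Spec_numero_disciplinas grade horarios cursadas out) := by unfold Spec_numero_disciplinas; infer_instance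

-- ===== CLAIM (what is proved, stated in full; the proofs are below) =====
def Claim_equal_numero_disciplinas : Prop := ∀ (grade : List (String × List String)) (horarios : List (String × String)) (cursadas : List String), Dom_numero_disciplinas grade horarios cursadas → Pre_numero_disciplinas grade horarios cursadas → Spec_numero_disciplinas grade horarios cursadas (numero_disciplinas grade horarios cursadas)

-- ===== LEMMAS AND PROOFS =====

theorem pvMeuIn_eq_contains (e : String) (l : List String) : pvMeuIn e l = l.contains e := by
  induction l with
  | nil => rfl
  | cons c rest ih =>
    simp only [pvMeuIn, ih, List.contains_cons, beq_iff_eq]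
    by_cases h : c = e
    · simp [h]
    · simp [h, Ne.symm h]

theorem pvAprovado_eq_all (cursadas reqs : List String) :
    pvAprovado cursadas reqs = reqs.all (fun r => cursadas.contains r) := by
  induction reqs with
  | nil => rfl
  | cons d rest ih =>
    rw [pvAprovado, pvMeuIn_eq_contains, List.all_cons, ih]
    cases cursadas.contains d <;> rfl

-- B's membership tests agree with A's list scans
theorem pvTaken_contains (cursadas : List String) (x : String) :
    PySem.Set.contains (PySem.Set.ofList cursadas) x = cursadas.contains x := by
  rcases h : cursadas.contains x with _|_
  · rw [← Bool.not_eq_true] at h ⊢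
    intro hc
    exact h ((List.contains_iff_mem).mpr ((PySem.Set.mem_ofList _ _).mp ((PySem.Set.contains_iff _ _).mp hc)))
  · exact (PySem.Set.contains_iff _ _).mpr ((PySem.Set.mem_ofList _ _).mpr (List.contains_iff_mem.mp h))

theorem pvSuperset_eq_all (cursadas reqs : List String) :
    PySem.Set.issuperset (PySem.Set.ofList cursadas) reqs
      = reqs.all (fun r => cursadas.contains r) := by
  rcases h : reqs.all (fun r => cursadas.contains r) with _|_
  · rw [← Bool.not_eq_true] at h ⊢
    intro hc
    apply h
    simp only [List.all_eq_true]
    intro r hr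
    exact List.contains_iff_mem.mpr ((PySem.Set.mem_ofList _ _).mp ((PySem.Set.issuperset_iff _ _).mp hc r hr))
  · apply (PySem.Set.issuperset_iff _ _).mpr
    intro r hr
    exact (PySem.Set.mem_ofList _ _).mpr (List.contains_iff_mem.mp ((List.all_eq_true.mp h) r hr))

-- lockstep invariant: A's loop keeps exactly a Set.add-fold of the eligible-slot stream as its dict values
theorem pvLoopA (grade : List (String × List String)) (cursadas : List String) :
    ∀ (hs : List (String × String)) (cad : PySem.Dict String String),
      (hs.map Prod.fst).Nodup →
      (∀ k ∈ cad.keys, k ∉ hs.map Prod.fst) →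
      (∀ p ∈ hs, p.1 ∉ cursadas → p.1 ∈ grade.map Prod.fst) →
      ∃ cadF E,
        hs.foldl (pvStepA grade cursadas) (some cad) = some cadF ∧
        pvEligibleSlots grade (PySem.Set.ofList cursadas) hs = some E ∧
        cadF.values = E.foldl PySem.Set.add cad.values := by
  intro hs
  induction hs with
  | nil =>
    intro cad _ _ _
    exact ⟨cad, [], rfl, rfl, rfl⟩
  | cons d hs' ih =>
    intro cad hnd hfresh hpre
    have hnd' : (hs'.map Prod.fst).Nodup := by simpa using hnd.of_cons
    have hhead : d.1 ∉ hs'.map Prod.fst := by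
      rw [List.map_cons] at hnd
      exact (List.nodup_cons.mp hnd).1
    have hfresh' : ∀ k ∈ cad.keys, k ∉ hs'.map Prod.fst := by
      intro k hk hmem
      exact hfresh k hk (by simp [hmem])
    have hpre' : ∀ p ∈ hs', p.1 ∉ cursadas → p.1 ∈ grade.map Prod.fst := by
      intro p hp; exact hpre p (by simp [hp])
    rw [List.foldl_cons]
    by_cases hc : d.1 ∈ cursadas
    · -- discipline already taken: both sides skip
      have hc' : cursadas.contains d.1 = true := by simpa using hc
      have hsA : pvStepA grade cursadas (some cad) d = some cad := by
        simp only [pvStepA, pvMeuIn_eq_contains, hc']; rfl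
      rw [hsA]
      obtain ⟨cadF, E, h1, h2, h3⟩ := ih cad hnd' hfresh' hpre'
      refine ⟨cadF, E, h1, ?_, h3⟩
      show pvEligibleSlots grade (PySem.Set.ofList cursadas) (d :: hs') = some E
      obtain ⟨da, db⟩ := d
      simp only [pvEligibleSlots, pvTaken_contains, hc', if_true]
      exact h2
    · have hc' : cursadas.contains d.1 = false := by simpa using hc
      have hkey : d.1 ∈ grade.map Prod.fst := hpre d (by simp) hc
      obtain ⟨reqs, hreqs⟩ : ∃ reqs, (PySem.Dict.mk grade).get? d.1 = some reqs := by
        cases hg : (PySem.Dict.mk grade).get? d.1 with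
        | none =>
          exact absurd (by simpa [PySem.Dict.keys_mk] using hkey)
            ((PySem.Dict.get?_eq_none_iff_not_mem_keys _ _).mp hg)
        | some r => exact ⟨r, rfl⟩
      by_cases ha : reqs.all (fun r => cursadas.contains r) = true
      · -- eligible: A's step produces values = Set.add cad.values d.2
        by_cases hvmem : cad.values.contains d.2 = true
        · -- slot already among A's values: A skips; Set.add is a no-op
          have hadd : PySem.Set.add cad.values d.2 = cad.values := by
            simp only [PySem.Set.add, PySem.Set.contains_eq_listContains, hvmem, if_true]
          have hsA : pvStepA grade cursadas (some cad) d = some cad := by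
            simp only [pvStepA, pvMeuIn_eq_contains, hc', hreqs, pvAprovado_eq_all, ha, hvmem]; rfl
          rw [hsA]
          obtain ⟨cadF, E, h1, h2, h3⟩ := ih cad hnd' hfresh' hpre'
          refine ⟨cadF, d.2 :: E, h1, ?_, ?_⟩
          · show pvEligibleSlots grade (PySem.Set.ofList cursadas) (d :: hs') = some (d.2 :: E)
            obtain ⟨da, db⟩ := d
            simp only [pvEligibleSlots, pvTaken_contains, hc', if_false, hreqs,
              pvSuperset_eq_all, ha, h2, Bool.false_eq_true]
            simp
          · rw [List.foldl_cons, hadd]; exact h3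
        · -- fresh slot: A inserts a fresh key, appending the slot to its values
          have hvmem' : cad.values.contains d.2 = false := by simpa using hvmem
          have hadd : PySem.Set.add cad.values d.2 = cad.values ++ [d.2] := by
            simp only [PySem.Set.add, PySem.Set.contains_eq_listContains, hvmem',
              Bool.false_eq_true, if_false]
          have hnotk : cad.contains d.1 = false := by
            rw [PySem.Dict.contains_eq_decide_mem_keys]
            simp only [decide_eq_false_iff_not]
            intro hk
            exact hfresh d.1 hk (by simp)
          have hsA : pvStepA grade cursadas (some cad) d = some (cad.insert d.1 d.2) := by
            simp only [pvStepA, pvMeuIn_eq_contains, hc', hreqs, pvAprovado_eq_all, ha, hvmem']; rfl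
          have hvals : (cad.insert d.1 d.2).values = cad.values ++ [d.2] := by
            simp only [PySem.Dict.values, PySem.Dict.items_insert_of_not_contains cad d.2 hnotk,
              List.map_append, List.map_cons, List.map_nil]
          have hkeys : ∀ k ∈ (cad.insert d.1 d.2).keys, k ∉ hs'.map Prod.fst := by
            intro k hk
            rcases (PySem.Dict.mem_keys_insert cad d.1 k d.2).mp hk with h | h
            · subst h; exact hhead
            · exact hfresh' k h
          rw [hsA]
          obtain ⟨cadF, E, h1, h2, h3⟩ := ih (cad.insert d.1 d.2) hnd' hkeys hpre'
          refine ⟨cadF, d.2 :: E, h1, ?_, ?_⟩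
          · show pvEligibleSlots grade (PySem.Set.ofList cursadas) (d :: hs') = some (d.2 :: E)
            obtain ⟨da, db⟩ := d
            simp only [pvEligibleSlots, pvTaken_contains, hc', if_false, hreqs,
              pvSuperset_eq_all, ha, h2, Bool.false_eq_true]
            simp
          · rw [List.foldl_cons, hadd, ← hvals]; exact h3
      · -- not eligible: A skips, the slot is not collected
        have ha' : (reqs.all fun r => cursadas.contains r) = false := by simpa using ha
        have hsA : pvStepA grade cursadas (some cad) d = some cad := by
          simp only [pvStepA, pvMeuIn_eq_contains, hc', hreqs, pvAprovado_eq_all, ha']; rfl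
        rw [hsA]
        obtain ⟨cadF, E, h1, h2, h3⟩ := ih cad hnd' hfresh' hpre'
        refine ⟨cadF, E, h1, ?_, h3⟩
        show pvEligibleSlots grade (PySem.Set.ofList cursadas) (d :: hs') = some E
        obtain ⟨da, db⟩ := d
        simp only [pvEligibleSlots, pvTaken_contains, hc', if_false, hreqs,
          pvSuperset_eq_all, ha', h2, Bool.false_eq_true]

-- card of insert, written with erase so it needs no membership hypothesis
theorem pvCardInsert (s : Finset String) (a : String) :
    (insert a s).card = (s.erase a).card + 1 := by
  by_cases h : a ∈ s
  · rw [Finset.insert_eq_self.mpr h, Finset.card_erase_add_one h]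
  · rw [Finset.card_insert_of_notMem h, Finset.erase_eq_of_notMem h]

-- the scan over a sorted list counts the distinct elements
theorem pvScan_some (l : List String) : ∀ (p : String) (c : Int),
    (p :: l).Pairwise (· ≤ ·) →
    pvScan l (some p) c = c + ((l.toFinset.erase p).card : Int) := by
  induction l with
  | nil => intro p c _; simp [pvScan]
  | cons h t ih =>
    intro p c hp
    have hph : p ≤ h := (List.pairwise_cons.mp hp).1 h (by simp)
    have htail : (h :: t).Pairwise (· ≤ ·) := (List.pairwise_cons.mp hp).2
    by_cases he : p = h
    · subst he
      rw [pvScan, if_neg (by simp), ih p c htail]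
      rw [List.toFinset_cons, Finset.erase_insert_eq_erase]
    · have hne : (p != h) = true := by simpa using he
      rw [pvScan, if_pos hne, ih h (c + 1) htail]
      have hpt : p ∉ t.toFinset := by
        intro hmem
        have hx : h ≤ p := (List.pairwise_cons.mp htail).1 p (List.mem_toFinset.mp hmem)
        exact he (le_antisymm hph hx)
      have hpi : p ∉ insert h t.toFinset := by
        intro hmem
        rcases Finset.mem_insert.mp hmem with h1 | h1
        · exact he h1
        · exact hpt h1
      rw [List.toFinset_cons, Finset.erase_eq_of_notMem hpi, pvCardInsert]
      push_cast
      ring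

theorem pvScan_none (l : List String) (c : Int) (h : l.Pairwise (· ≤ ·)) :
    pvScan l none c = c + (l.toFinset.card : Int) := by
  cases l with
  | nil => simp [pvScan]
  | cons a t =>
    rw [pvScan, pvScan_some t a (c + 1) h, List.toFinset_cons, pvCardInsert]
    push_cast
    ring

-- ===== VERDICT (by name: the statement is the Claim_ definition above) =====
theorem numero_disciplinas_spec : Claim_equal_numero_disciplinas := by
  unfold Claim_equal_numero_disciplinas
  intro grade horarios cursadas _ hpre
  obtain ⟨hnd, hkeys⟩ := hpre
  obtain ⟨cadF, E, hA, hB, hvals⟩ :=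
    pvLoopA grade cursadas horarios (PySem.Dict.mk [])
      hnd (by intro k hk; simp [PySem.Dict.keys_mk] at hk) hkeys
  unfold Spec_numero_disciplinas numero_disciplinas numero_disciplinas_alt
  rw [hA, hB]
  show (cadF.size : Int) = pvScan (PySem.List.sorted E (fun x => x) false) none 0
  -- A's side: the dict size is the length of set(E)
  have hofl : cadF.values = PySem.Set.ofList E := by
    rw [hvals, PySem.Set.ofList_eq_foldl]; rfl
  have hsize : cadF.size = (PySem.Set.ofList E).length := by
    have h2 : cadF.values.length = (PySem.Set.ofList E).length := by rw [hofl]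
    simpa [PySem.Dict.values, PySem.Dict.size] using h2
  have hcard : (PySem.Set.ofList E).length = E.toFinset.card := by
    have hfin : (PySem.Set.ofList E : List String).toFinset = E.toFinset := by
      ext x
      simp [List.mem_toFinset, PySem.Set.mem_ofList]
    rw [← List.toFinset_card_of_nodup (PySem.Set.nodup_ofList E), hfin]
  -- B's side: the scan over the sorted list counts the distinct elements
  have hpair : (PySem.List.sorted E (fun x => x) false).Pairwise (· ≤ ·) := by
    simpa using PySem.List.sorted_pairwise E (fun x => x)
  have hperm : (PySem.List.sorted E (fun x => x) false).toFinset = E.toFinset :=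
    List.toFinset_eq_of_perm _ _ (PySem.List.sorted_perm E (fun x => x) false)
  rw [pvScan_none _ 0 hpair, hperm, hsize, hcard]
  ring
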